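-- pv_equiv track=rewrite | github.com/SmileyChris/addventure | src/addventure/jigsaw.py | interleave_pieces
-- ===== SOURCE A (Python) =====
-- def interleave_pieces(pieces: list, cols: int) -> list:
--     """Reorder pieces so no original neighbors are adjacent.
--
--     Uses every-3rd interleave: positions 0,3,6,1,4,7,2,5,...
--     """
--     n = len(pieces)
--     step = 3
--     order = []
--     for start in range(step):
--         for i in range(start, n, step):
--             order.append(i)
--     return [pieces[i] for i in order]
-- ===== SOURCE B (Python) =====
-- def interleave_pieces(pieces: list, cols: int) -> list:
--     """Reorder pieces so no original neighbors are adjacent.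
--
--     Single pass: partition elements into three buckets by index mod 3,
--     then concatenate the buckets (cols is unused, as in the original).
--     """
--     b0, b1, b2 = [], [], []
--     for i, p in enumerate(pieces):
--         r = i % 3
--         if r == 0:
--             b0.append(p)
--         elif r == 1:
--             b1.append(p)
--         else:
--             b2.append(p)
--     return b0 + b1 + b2
-- ===== Notes on version B (the rewrite author's own statement) =====
-- stated objective: alternative
-- what changed: Instead of building an index permutation with nested modular range loops and then gathering pieces[i], B makes one pass over the list with enumerate, partitioning elements into three buckets by index mod 3 and concatenating them; no index list and no element indexing at all.
import Mathlib
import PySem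

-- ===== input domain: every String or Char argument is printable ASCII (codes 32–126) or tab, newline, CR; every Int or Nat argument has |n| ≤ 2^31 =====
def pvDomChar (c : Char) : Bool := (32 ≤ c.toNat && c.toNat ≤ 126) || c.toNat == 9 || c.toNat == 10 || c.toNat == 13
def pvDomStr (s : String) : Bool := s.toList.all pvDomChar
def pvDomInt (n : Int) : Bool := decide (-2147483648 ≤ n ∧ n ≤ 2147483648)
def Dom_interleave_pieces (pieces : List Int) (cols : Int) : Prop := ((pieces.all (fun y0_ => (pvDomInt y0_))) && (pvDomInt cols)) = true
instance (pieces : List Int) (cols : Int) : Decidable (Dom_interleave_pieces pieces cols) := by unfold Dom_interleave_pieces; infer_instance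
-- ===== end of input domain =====

-- B replaces A's nested modular index loops + gather with a single enumerate pass into
-- three mod-3 buckets that are then concatenated (alternative decomposition, same O(n) cost).

-- ===== PORT A =====
-- Literal port of A: build 'order' with nested range loops, then gather pieces[i].
-- Every i in 'order' is in range, so Python's pieces[i] never raises; pyGetD's default 0
-- is never used (exact on all inputs).
def interleave_pieces (pieces : List Int) (cols : Int) : List Int :=
  let n : Int := pieces.length
  let step : Int := 3
  let order : List Int :=
    (PySem.List.pyRange 0 step 1).foldl
      (fun order start =>
        (PySem.List.pyRange start n step).foldl (fun order i => order ++ [i]) order) []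
  order.map (fun i => PySem.List.pyGetD pieces i 0)

-- ===== PORT B =====
-- Literal port of B: one pass over enumerate(pieces), appending each element to the
-- bucket selected by its index mod 3, then b0 + b1 + b2.
def interleave_pieces_alt (pieces : List Int) (cols : Int) : List Int :=
  let s :=
    (PySem.List.enumerate pieces 0).foldl
      (fun (s : List Int × List Int × List Int) ip =>
        let r := PySem.Int.mod ip.1 3
        if r = 0 then (s.1 ++ [ip.2], s.2.1, s.2.2)
        else if r = 1 then (s.1, s.2.1 ++ [ip.2], s.2.2)
        else (s.1, s.2.1, s.2.2 ++ [ip.2])) ([], [], [])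
  s.1 ++ (s.2.1 ++ s.2.2)

-- ===== PRECONDITION & SPEC =====
def Spec_interleave_pieces (pieces : List Int) (cols : Int) (out : List Int) : Prop := out = interleave_pieces_alt pieces cols
instance (pieces : List Int) (cols : Int) (out : List Int) : Decidable (Spec_interleave_pieces pieces cols out) := by unfold Spec_interleave_pieces; infer_instance

-- ===== CLAIM (what is proved, stated in full; the proofs are below) =====
def Claim_equal_interleave_pieces : Prop := ∀ (pieces : List Int) (cols : Int), Dom_interleave_pieces pieces cols → Spec_interleave_pieces pieces cols (interleave_pieces pieces cols)

-- ===== LEMMAS AND PROOFS =====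

-- Elements at positions 0, 3, 6, … of a list.
def pick3 : List Int → List Int
  | [] => []
  | x :: t => x :: pick3 (t.drop 2)
termination_by xs => xs.length
decreasing_by simp

theorem pick3_nil : pick3 [] = [] := by simp [pick3]

theorem pick3_cons (x : Int) (t : List Int) : pick3 (x :: t) = x :: pick3 (t.drop 2) := by
  simp [pick3]

-- step-3 range reduction lemmas
theorem pyRange3_nil (a b : Int) (h : b ≤ a) : PySem.List.pyRange a b 3 = [] := by
  rw [PySem.List.pyRange_of_pos a b (by norm_num)]
  simp [if_neg (not_lt.mpr h)]

theorem pyRange3_cons (a b : Int) (h : a < b) :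
    PySem.List.pyRange a b 3 = a :: PySem.List.pyRange (a + 3) b 3 := by
  rw [PySem.List.pyRange_of_pos a b (by norm_num),
      PySem.List.pyRange_of_pos (a + 3) b (by norm_num)]
  have hm : (if a < b then ((b - a + 3 - 1) / 3).toNat else 0)
      = (if a + 3 < b then ((b - (a + 3) + 3 - 1) / 3).toNat else 0) + 1 := by
    split_ifs <;> omega
  rw [hm, List.range_succ_eq_map]
  simp [List.map_map, Function.comp]
  intro k _
  ring

-- A's gather over a step-3 range is pick3 of the dropped list.
theorem mapA (fuel : Nat) (xs : List Int) (r : Int) (h0 : 0 ≤ r)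
    (hf : (xs.length : Int) - r ≤ fuel) :
    (PySem.List.pyRange r (xs.length : Int) 3).map (fun i => PySem.List.pyGetD xs i 0)
      = pick3 (xs.drop r.toNat) := by
  induction fuel generalizing r with
  | zero =>
      have hge : (xs.length : Int) ≤ r := by omega
      rw [pyRange3_nil _ _ hge]
      have : xs.drop r.toNat = [] := List.drop_eq_nil_of_le (by omega)
      simp [this, pick3_nil]
  | succ f ih =>
      by_cases hlt : r < (xs.length : Int)
      · rw [pyRange3_cons _ _ hlt]
        have hget : PySem.List.pyGetD xs r 0 = xs[r.toNat] :=
          PySem.List.pyGetD_eq_getElem xs 0 h0 hlt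
        have hdrop : xs.drop r.toNat = xs[r.toNat] :: xs.drop (r.toNat + 1) :=
          List.drop_eq_getElem_cons (by omega)
        have hrec := ih (r + 3) (by omega) (by omega)
        have hd3 : (xs.drop (r.toNat + 1)).drop 2 = xs.drop (r + 3).toNat := by
          rw [List.drop_drop]
          congr 1
          omega
        rw [List.map_cons, hget, hrec, hdrop, pick3_cons, hd3]
      · rw [pyRange3_nil _ _ (by omega)]
        have : xs.drop r.toNat = [] := List.drop_eq_nil_of_le (by omega)
        simp [this, pick3_nil]

-- B's fold invariant: starting offset s ≥ 0, the three buckets accumulate the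
-- mod-3 classes of the remaining list, rotated by s % 3.
theorem foldB (xs : List Int) (s : Int) (hs : 0 ≤ s) (a b c : List Int) :
    (PySem.List.enumerate xs s).foldl
      (fun (s : List Int × List Int × List Int) ip =>
        let r := PySem.Int.mod ip.1 3
        if r = 0 then (s.1 ++ [ip.2], s.2.1, s.2.2)
        else if r = 1 then (s.1, s.2.1 ++ [ip.2], s.2.2)
        else (s.1, s.2.1, s.2.2 ++ [ip.2])) (a, b, c)
      = (if s % 3 = 0 then (a ++ pick3 xs, b ++ pick3 (xs.drop 1), c ++ pick3 (xs.drop 2))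
         else if s % 3 = 1 then (a ++ pick3 (xs.drop 2), b ++ pick3 xs, c ++ pick3 (xs.drop 1))
         else (a ++ pick3 (xs.drop 1), b ++ pick3 (xs.drop 2), c ++ pick3 xs)) := by
  induction xs generalizing s a b c with
  | nil =>
      simp [PySem.List.enumerate, pick3_nil]
  | cons x t ih =>
      have hmod : PySem.Int.mod s 3 = s % 3 := by
        simp [PySem.Int.mod, Int.fmod_eq_emod]
      have h3 : s % 3 = 0 ∨ s % 3 = 1 ∨ s % 3 = 2 := by omega
      have hrec := fun a b c => ih (s + 1) (by omega) a b c
      rcases h3 with h | h | h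
      · simp only [PySem.List.enumerate, List.foldl_cons, hmod, h]
        rw [hrec]
        have h1 : (s + 1) % 3 = 1 := by omega
        simp [h1, pick3_cons]
      · simp only [PySem.List.enumerate, List.foldl_cons, hmod, h]
        rw [hrec]
        have h1 : (s + 1) % 3 = 2 := by omega
        simp [h1, pick3_cons]
      · simp only [PySem.List.enumerate, List.foldl_cons, hmod, h]
        rw [hrec]
        have h1 : (s + 1) % 3 = 0 := by omega
        simp [h1, pick3_cons]

theorem alt_eq (pieces : List Int) (cols : Int) :
    interleave_pieces_alt pieces cols
      = pick3 pieces ++ (pick3 (pieces.drop 1) ++ pick3 (pieces.drop 2)) := by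
  unfold interleave_pieces_alt
  rw [foldB pieces 0 (by norm_num) [] [] []]
  simp

theorem a_eq (pieces : List Int) (cols : Int) :
    interleave_pieces pieces cols
      = pick3 pieces ++ (pick3 (pieces.drop 1) ++ pick3 (pieces.drop 2)) := by
  unfold interleave_pieces
  have h012 : PySem.List.pyRange 0 3 1 = [0, 1, 2] := by decide
  simp only [h012, List.foldl_cons, List.foldl_nil,
    PySem.List.foldl_append_singleton_eq_map (fun (i : Int) => i)]
  simp only [List.map_id_fun', id_eq, List.nil_append, List.map_append]
  have m0 := mapA (pieces.length + 1) pieces 0 (by norm_num) (by push_cast; omega)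
  have m1 := mapA (pieces.length + 1) pieces 1 (by norm_num) (by push_cast; omega)
  have m2 := mapA (pieces.length + 1) pieces 2 (by norm_num) (by push_cast; omega)
  rw [m0, m1, m2]
  simp [Int.toNat]

-- ===== VERDICT (by name: the statement is the Claim_ definition above) =====
theorem interleave_pieces_spec : Claim_equal_interleave_pieces := by
  intro pieces cols _
  unfold Spec_interleave_pieces
  rw [a_eq, alt_eq]
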